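-- pv_equiv track=rewrite | github.com/hrply/bioscience | research/project_manager/ai_researcher/models/api_client.py | _generate_full_url
-- ===== SOURCE A (Python) =====
-- from typing import Dict, Optional, Any
--
-- def _generate_full_url(base_url: str, api_type: str, config: Dict[str, Any]) -> str:
--     """
--     根据API类型生成完整的URL
--
--     Args:
--         base_url: 基础URL
--         api_type: API类型
--         config: 配置字典
--
--     Returns:
--         完整的URL
--     """
--     if not base_url:
--         return ""
--
--     # 移除末尾的斜杠
--     base_url = base_url.rstrip("/")
--
--     # 根据API类型生成完整URL
--     if api_type == "new_api":
--         # NEW-API根据具体的API格式补全路径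
--         # 这里需要从配置中获取实际要使用的API格式
--         model_name = config.get("model_name", "").lower()
--         provider = config.get("provider", "").lower()
--
--         # 优先根据提供商判断
--         if "claude" in provider or "anthropic" in provider:
--             return f"{base_url}/v1/messages"
--         elif "gemini" in provider or "google" in provider:
--             return f"{base_url}/v1/generateContent"
--         elif "openai" in provider or "deepseek" in provider:
--             return f"{base_url}/v1/chat/completions"
--
--         # 再根据模型名判断
--         if any(keyword in model_name for keyword in ["claude", "anthropic"]):
--             return f"{base_url}/v1/messages"
--         elif any(keyword in model_name for keyword in ["gemini", "google"]):
--             return f"{base_url}/v1/generateContent"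
--         elif any(keyword in model_name for keyword in ["gpt", "chat"]):
--             return f"{base_url}/v1/chat/completions"
--         else:
--             # 默认使用OpenAI格式
--             return f"{base_url}/v1/chat/completions"
--     else:
--         # 非NEW-API类型，直接返回基础URL
--         return base_url
-- ===== SOURCE B (Python) =====
-- # Priority-rule list scanned back-to-front with overwrite: the suffix of the
-- # highest-priority matching rule survives; default is the OpenAI path.
-- _RULES = [
--     ("provider", "claude", "/v1/messages"),
--     ("provider", "anthropic", "/v1/messages"),
--     ("provider", "gemini", "/v1/generateContent"),
--     ("provider", "google", "/v1/generateContent"),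
--     ("provider", "openai", "/v1/chat/completions"),
--     ("provider", "deepseek", "/v1/chat/completions"),
--     ("model_name", "claude", "/v1/messages"),
--     ("model_name", "anthropic", "/v1/messages"),
--     ("model_name", "gemini", "/v1/generateContent"),
--     ("model_name", "google", "/v1/generateContent"),
--     ("model_name", "gpt", "/v1/chat/completions"),
--     ("model_name", "chat", "/v1/chat/completions"),
-- ]
--
--
-- def _generate_full_url(base_url: str, api_type: str, config) -> str:
--     if not base_url:
--         return ""
--     base = base_url.rstrip("/")
--     if api_type != "new_api":
--         return base
--     texts = {
--         "provider": config.get("provider", "").lower(),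
--         "model_name": config.get("model_name", "").lower(),
--     }
--     suffix = "/v1/chat/completions"
--     for field, keyword, sfx in reversed(_RULES):
--         if keyword in texts[field]:
--             suffix = sfx
--     return base + suffix
-- ===== Notes on version B (the rewrite author's own statement) =====
-- stated objective: alternative
-- what changed: Replaces the six-way short-circuit if/elif chain with a flat priority list of 12 (field, keyword, suffix) rules scanned back-to-front with overwrite, so the highest-priority matching rule's suffix survives; no early return, every rule is tested.
import Mathlib
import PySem

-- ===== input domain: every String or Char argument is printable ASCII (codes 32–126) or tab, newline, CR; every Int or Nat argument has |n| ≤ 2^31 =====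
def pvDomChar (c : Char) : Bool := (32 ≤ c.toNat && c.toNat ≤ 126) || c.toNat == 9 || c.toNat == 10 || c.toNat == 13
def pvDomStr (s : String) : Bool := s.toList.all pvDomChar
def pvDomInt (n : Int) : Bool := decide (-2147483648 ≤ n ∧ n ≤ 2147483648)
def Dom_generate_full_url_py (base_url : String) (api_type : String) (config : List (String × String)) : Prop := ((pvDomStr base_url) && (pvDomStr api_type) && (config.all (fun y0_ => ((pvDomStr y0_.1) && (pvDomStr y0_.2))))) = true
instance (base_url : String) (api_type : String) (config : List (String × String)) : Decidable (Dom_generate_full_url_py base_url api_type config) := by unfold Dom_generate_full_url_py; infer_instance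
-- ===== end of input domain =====

-- B replaces A's six-way short-circuit if/elif keyword chain by a flat priority list of
-- 12 (field, keyword, suffix) rules scanned back-to-front with overwrite (objective:
-- alternative); same return value everywhere, no side effects.

-- s.rstrip("/"): drop trailing '/' characters (exact for this single-char strip set)
def rstripSlash (s : String) : String :=
  String.ofList ((s.toList.reverse.dropWhile (· == '/')).reverse)

-- ===== PORT A =====
def generate_full_url_py (base_url : String) (api_type : String) (config : List (String × String)) : String :=
  if base_url == "" then ""
  else
    let base := rstripSlash base_url
    if api_type == "new_api" then
      let model_name := PySem.Str.lower (PySem.Dict.getD (PySem.Dict.mk config) "model_name" "")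
      let provider := PySem.Str.lower (PySem.Dict.getD (PySem.Dict.mk config) "provider" "")
      if PySem.Str.isIn "claude" provider || PySem.Str.isIn "anthropic" provider then
        base ++ "/v1/messages"
      else if PySem.Str.isIn "gemini" provider || PySem.Str.isIn "google" provider then
        base ++ "/v1/generateContent"
      else if PySem.Str.isIn "openai" provider || PySem.Str.isIn "deepseek" provider then
        base ++ "/v1/chat/completions"
      else if ["claude", "anthropic"].any (fun k => PySem.Str.isIn k model_name) then
        base ++ "/v1/messages"
      else if ["gemini", "google"].any (fun k => PySem.Str.isIn k model_name) then
        base ++ "/v1/generateContent"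
      else if ["gpt", "chat"].any (fun k => PySem.Str.isIn k model_name) then
        base ++ "/v1/chat/completions"
      else
        base ++ "/v1/chat/completions"
    else base

-- ===== PORT B =====
-- flat priority list: earlier rule = higher priority
def pvRules : List (String × String × String) :=
  [("provider", "claude", "/v1/messages"),
   ("provider", "anthropic", "/v1/messages"),
   ("provider", "gemini", "/v1/generateContent"),
   ("provider", "google", "/v1/generateContent"),
   ("provider", "openai", "/v1/chat/completions"),
   ("provider", "deepseek", "/v1/chat/completions"),
   ("model_name", "claude", "/v1/messages"),
   ("model_name", "anthropic", "/v1/messages"),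
   ("model_name", "gemini", "/v1/generateContent"),
   ("model_name", "google", "/v1/generateContent"),
   ("model_name", "gpt", "/v1/chat/completions"),
   ("model_name", "chat", "/v1/chat/completions")]

def generate_full_url_py_alt (base_url : String) (api_type : String) (config : List (String × String)) : String :=
  if base_url == "" then ""
  else
    let base := rstripSlash base_url
    if api_type != "new_api" then base
    else
      let texts : PySem.Dict String String :=
        PySem.Dict.mk
          [("provider", PySem.Str.lower (PySem.Dict.getD (PySem.Dict.mk config) "provider" "")),
           ("model_name", PySem.Str.lower (PySem.Dict.getD (PySem.Dict.mk config) "model_name" ""))]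
      -- back-to-front overwrite scan: last assignment in the reversed order wins
      let suffix := pvRules.reverse.foldl
        (fun acc r => if PySem.Str.isIn r.2.1 (PySem.Dict.getD texts r.1 "") then r.2.2 else acc)
        "/v1/chat/completions"
      base ++ suffix

-- ===== PRECONDITION & SPEC =====
def Spec_generate_full_url_py (base_url : String) (api_type : String) (config : List (String × String)) (out : String) : Prop := out = generate_full_url_py_alt base_url api_type config
instance (base_url : String) (api_type : String) (config : List (String × String)) (out : String) : Decidable (Spec_generate_full_url_py base_url api_type config out) := by unfold Spec_generate_full_url_py; infer_instance

-- ===== CLAIM (what is proved, stated in full; the proofs are below) =====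
def Claim_equal_generate_full_url_py : Prop := ∀ (base_url : String) (api_type : String) (config : List (String × String)), Dom_generate_full_url_py base_url api_type config → Spec_generate_full_url_py base_url api_type config (generate_full_url_py base_url api_type config)

-- ===== LEMMAS AND PROOFS =====

-- ===== VERDICT (by name: the statement is the Claim_ definition above) =====
theorem generate_full_url_py_spec : Claim_equal_generate_full_url_py := by
  intro base_url api_type config _
  unfold Spec_generate_full_url_py generate_full_url_py generate_full_url_py_alt
  by_cases hb : base_url == ""
  · simp [hb]
  · simp only [hb, Bool.false_eq_true, reduceIte]
    by_cases ha : api_type == "new_api"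
    · simp only [ha, if_pos, bne, Bool.not_true, Bool.false_eq_true, reduceIte]
      simp [pvRules, PySem.Dict.getD, PySem.Dict.get?, List.find?]
      generalize (PySem.Chars.lower ((Option.map (fun x => x.2) (List.find? (fun p => p.1 == "provider") config)).getD "").toList) = PV
      generalize (PySem.Chars.lower ((Option.map (fun x => x.2) (List.find? (fun p => p.1 == "model_name") config)).getD "").toList) = MV
      generalize PySem.Chars.isIn ['c','l','a','u','d','e'] PV = p1
      generalize PySem.Chars.isIn ['a','n','t','h','r','o','p','i','c'] PV = p2
      generalize PySem.Chars.isIn ['g','e','m','i','n','i'] PV = p3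
      generalize PySem.Chars.isIn ['g','o','o','g','l','e'] PV = p4
      generalize PySem.Chars.isIn ['o','p','e','n','a','i'] PV = p5
      generalize PySem.Chars.isIn ['d','e','e','p','s','e','e','k'] PV = p6
      generalize PySem.Chars.isIn ['c','l','a','u','d','e'] MV = m1
      generalize PySem.Chars.isIn ['a','n','t','h','r','o','p','i','c'] MV = m2
      generalize PySem.Chars.isIn ['g','e','m','i','n','i'] MV = m3
      generalize PySem.Chars.isIn ['g','o','o','g','l','e'] MV = m4
      generalize PySem.Chars.isIn ['g','p','t'] MV = m5
      generalize PySem.Chars.isIn ['c','h','a','t'] MV = m6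
      generalize rstripSlash base_url = base
      cases p1 <;> cases p2 <;> cases p3 <;> cases p4 <;> cases p5 <;> cases p6 <;> cases m1 <;> cases m2 <;> cases m3 <;> cases m4 <;> cases m5 <;> cases m6 <;> rfl
    · simp [ha, bne]
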